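-- pv_equiv track=rewrite | github.com/nazarov-yuriy/contests | yrrgpbqr/p0966/__init__.py | spellchecker
-- ===== SOURCE A (Python) =====
-- from typing import List
--
-- def replace_chars(s, chars, replacement):
--     for char in chars:
--         s = s.replace(char, replacement)
--     return s
--
-- def spellchecker(wordlist: List[str], queries: List[str]) -> List[str]:
--     orig = {}
--     lower = {}
--     no_vowel = {}
--     for word in wordlist:
--         orig[word] = [word]
--         lower.setdefault(word.lower(), []).append(word)
--         no_vowel.setdefault(replace_chars(word.lower(), ['a', 'e', 'i', 'o', 'u'], '_'), []).append(word)
--     res = []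
--     for query in queries:
--         if query in orig:
--             res.append(query)
--         elif query.lower() in lower:
--             res.append(lower[query.lower()][0])
--         elif replace_chars(query.lower(), ['a', 'e', 'i', 'o', 'u'], '_') in no_vowel:
--             res.append(no_vowel[replace_chars(query.lower(), ['a', 'e', 'i', 'o', 'u'], '_')][0])
--         else:
--             res.append('')
--     return res
-- ===== SOURCE B (Python) =====
-- def spellchecker(wordlist, queries):
--     vowels = set('aeiou')
--
--     def mask(w):
--         return ''.join('_' if c in vowels else c for c in w.lower())
--
--     def answer(q):
--         if q in wordlist:
--             return q
--         ql = q.lower()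
--         hit = next((w for w in wordlist if w.lower() == ql), None)
--         if hit is not None:
--             return hit
--         qm = mask(q)
--         return next((w for w in wordlist if mask(w) == qm), '')
--
--     return [answer(q) for q in queries]
-- ===== Notes on version B (the rewrite author's own statement) =====
-- stated objective: simpler
-- what changed: Replaces the three precomputed first-occurrence dictionaries with per-query front-to-back scans of the wordlist at the three precedence levels (exact, case-insensitive, vowel-insensitive), masking vowels by a single character pass instead of five sequential str.replace calls.
import Mathlib
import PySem

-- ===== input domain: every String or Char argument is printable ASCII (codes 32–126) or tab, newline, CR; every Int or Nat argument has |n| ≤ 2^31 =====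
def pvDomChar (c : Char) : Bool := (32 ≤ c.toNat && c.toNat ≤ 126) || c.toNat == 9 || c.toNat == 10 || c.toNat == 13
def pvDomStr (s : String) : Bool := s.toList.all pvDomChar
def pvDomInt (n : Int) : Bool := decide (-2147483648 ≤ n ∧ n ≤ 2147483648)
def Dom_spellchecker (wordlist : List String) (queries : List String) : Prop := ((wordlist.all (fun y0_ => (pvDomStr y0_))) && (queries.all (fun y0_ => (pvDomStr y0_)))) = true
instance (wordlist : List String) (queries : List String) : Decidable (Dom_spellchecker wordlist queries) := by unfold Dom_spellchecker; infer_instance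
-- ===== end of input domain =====

-- B replaces A's three precomputed first-occurrence dictionaries by per-query linear
-- scans of the wordlist at the three precedence levels (objective: simpler).

-- ===== PORT A =====
def replaceChars (s : String) (chars : List String) (replacement : String) : String :=
  chars.foldl (fun s char => PySem.Str.replace s char replacement) s

def spellchecker (wordlist : List String) (queries : List String) : List String :=
  -- one fold builds the three dicts (orig, lower, no_vowel); setdefault(k, []).append(w)
  -- on a dict of lists is exactly Dict.modify k [] (· ++ [w])
  let dicts := wordlist.foldl
    (fun (st : PySem.Dict String (List String) × PySem.Dict String (List String) × PySem.Dict String (List String)) word =>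
      (st.1.insert word [word],
       st.2.1.modify (PySem.Str.lower word) [] (· ++ [word]),
       st.2.2.modify (replaceChars (PySem.Str.lower word) ["a", "e", "i", "o", "u"] "_") [] (· ++ [word])))
    (PySem.Dict.empty, PySem.Dict.empty, PySem.Dict.empty)
  queries.foldl
    (fun res query =>
      if dicts.1.contains query then res ++ [query]
      else if dicts.2.1.contains (PySem.Str.lower query) then
        -- lower[query.lower()][0]: the stored list is nonempty whenever the key is present
        res ++ [(dicts.2.1.getD (PySem.Str.lower query) []).headD ""]
      else if dicts.2.2.contains (replaceChars (PySem.Str.lower query) ["a", "e", "i", "o", "u"] "_") then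
        res ++ [(dicts.2.2.getD (replaceChars (PySem.Str.lower query) ["a", "e", "i", "o", "u"] "_") []).headD ""]
      else res ++ [""])
    []

-- ===== PORT B =====
def maskB (w : String) : String :=
  String.ofList ((PySem.Str.lower w).toList.map (fun c => if ['a', 'e', 'i', 'o', 'u'].contains c then '_' else c))

def answerB (wordlist : List String) (q : String) : String :=
  if wordlist.contains q then q
  else
    match wordlist.find? (fun w => PySem.Str.lower w == PySem.Str.lower q) with
    | some w => w
    | none =>
      match wordlist.find? (fun w => maskB w == maskB q) with
      | some w => w
      | none => ""

def spellchecker_alt (wordlist : List String) (queries : List String) : List String :=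
  queries.map (answerB wordlist)

-- ===== PRECONDITION & SPEC =====
def Spec_spellchecker (wordlist : List String) (queries : List String) (out : List String) : Prop := out = spellchecker_alt wordlist queries
instance (wordlist : List String) (queries : List String) (out : List String) : Decidable (Spec_spellchecker wordlist queries out) := by unfold Spec_spellchecker; infer_instance

-- ===== CLAIM (what is proved, stated in full; the proofs are below) =====
def Claim_equal_spellchecker : Prop := ∀ (wordlist : List String) (queries : List String), Dom_spellchecker wordlist queries → Spec_spellchecker wordlist queries (spellchecker wordlist queries)

-- ===== LEMMAS AND PROOFS =====

-- the triple fold splits into three independent folds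
theorem foldl_triple {α β γ δ : Type} (f1 : α → δ → α) (f2 : β → δ → β) (f3 : γ → δ → γ)
    (l : List δ) (a : α) (b : β) (c : γ) :
    l.foldl (fun st w => (f1 st.1 w, f2 st.2.1 w, f3 st.2.2 w)) (a, b, c) =
      (l.foldl f1 a, l.foldl f2 b, l.foldl f3 c) := by
  induction l generalizing a b c with
  | nil => rfl
  | cons x t ih => simpa using ih (f1 a x) (f2 b x) (f3 c x)

-- membership in the orig dict is membership in the wordlist
theorem contains_foldl_insert_self (l : List String) (d : PySem.Dict String (List String)) (q : String) :
    (l.foldl (fun d w => d.insert w [w]) d).contains q = (d.contains q || l.contains q) := by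
  induction l generalizing d with
  | nil => simp
  | cons x t ih =>
    simp only [List.foldl_cons, ih, PySem.Dict.contains_insert, List.contains_cons]
    cases h : q == x <;> simp

-- membership in a grouping dict is membership of the key image
theorem contains_foldl_modify (key : String → String) (l : List String)
    (d : PySem.Dict String (List String)) (c : String) :
    (l.foldl (fun d w => d.modify (key w) [] (· ++ [w])) d).contains c
      = (d.contains c || (l.map key).contains c) := by
  induction l generalizing d with
  | nil => simp
  | cons x t ih =>
    simp only [List.foldl_cons, ih, PySem.Dict.contains_modify, List.map_cons, List.contains_cons]
    cases h : c == key x <;> simp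

-- the stored list of a grouping dict built from empty is the filter by key
theorem getD_foldl_modify_key (key : String → String) (l : List String) (c : String) :
    (l.foldl (fun d w => d.modify (key w) [] (· ++ [w])) PySem.Dict.empty).getD c []
      = l.filter (fun w => key w == c) := by
  have h : l.foldl (fun d w => d.modify (key w) [] (· ++ [w])) PySem.Dict.empty
      = (l.map (fun w => (key w, w))).foldl (fun d p => d.modify p.1 [] (· ++ [p.2])) PySem.Dict.empty := by
    rw [List.foldl_map]
  rw [h, PySem.Dict.getD_foldl_modify_append]
  simp [List.filter_map, Function.comp_def]

-- five sequential single-character replaces are one character map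
theorem replace_go_single (a b : Char) (l : List Char) :
    ∀ (fuel : Nat) (acc : List Char), l.length ≤ fuel →
      PySem.Chars.replace.go [a] [b] fuel l acc
        = acc.reverse ++ l.map (fun c => if c == a then b else c) := by
  induction l with
  | nil =>
    intro fuel acc _
    cases fuel <;> simp [PySem.Chars.replace.go]
  | cons x t ih =>
    intro fuel acc hle
    cases fuel with
    | zero => simp at hle
    | succ f =>
      rw [PySem.Chars.replace.go]
      have hpre : List.isPrefixOf [a] (x :: t) = (a == x) := by simp [List.isPrefixOf]
      by_cases hx : a = x
      · rw [if_pos (by simp [hx])]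
        subst hx
        simpa using ih f (b :: acc) (by simpa using hle)
      · rw [if_neg (by simp [hpre, hx])]
        rw [ih f (x :: acc) (by simpa using hle)]
        simp
        exact fun h => absurd h.symm hx

theorem replace_single (a b : Char) (s : List Char) :
    PySem.Chars.replace s [a] [b] = s.map (fun c => if c == a then b else c) := by
  rw [PySem.Chars.replace, if_neg (by simp : ¬([a] : List Char).isEmpty = true)]
  exact replace_go_single a b s s.length [] le_rfl

-- A's vowel masking (five sequential replaces) equals B's single character pass
theorem mask_eq (s : String) :
    replaceChars s ["a", "e", "i", "o", "u"] "_"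
      = String.ofList (s.toList.map (fun c => if ['a', 'e', 'i', 'o', 'u'].contains c then '_' else c)) := by
  have htl : (replaceChars s ["a", "e", "i", "o", "u"] "_").toList
      = s.toList.map (fun c => if ['a', 'e', 'i', 'o', 'u'].contains c then '_' else c) := by
    simp only [replaceChars, List.foldl_cons, List.foldl_nil, PySem.Str.toList_replace]
    have ha : ("a" : String).toList = ['a'] := rfl
    have he : ("e" : String).toList = ['e'] := rfl
    have hi : ("i" : String).toList = ['i'] := rfl
    have ho : ("o" : String).toList = ['o'] := rfl
    have hu : ("u" : String).toList = ['u'] := rfl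
    have hw : ("_" : String).toList = ['_'] := rfl
    rw [ha, he, hi, ho, hu, hw]
    rw [replace_single, replace_single, replace_single, replace_single, replace_single]
    simp only [List.map_map]
    apply List.map_congr_left
    intro c _
    simp only [Function.comp]
    by_cases h1 : c = 'a' <;> by_cases h2 : c = 'e' <;> by_cases h3 : c = 'i' <;>
      by_cases h4 : c = 'o' <;> by_cases h5 : c = 'u' <;>
      simp_all
  rw [← String.toList_inj, htl, String.toList_ofList]

theorem maskA_eq_maskB (w : String) :
    replaceChars (PySem.Str.lower w) ["a", "e", "i", "o", "u"] "_" = maskB w := mask_eq _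

-- the first-occurrence answer of A's lookups equals B's per-query scan
theorem answer_eq (wordlist : List String) (q : String) :
    (if (wordlist.foldl (fun d w => d.insert w [w]) PySem.Dict.empty).contains q then q
     else if (wordlist.foldl (fun d w => d.modify (PySem.Str.lower w) [] (· ++ [w])) PySem.Dict.empty).contains (PySem.Str.lower q) then
       ((wordlist.foldl (fun d w => d.modify (PySem.Str.lower w) [] (· ++ [w])) PySem.Dict.empty).getD (PySem.Str.lower q) []).headD ""
     else if (wordlist.foldl (fun d w => d.modify (replaceChars (PySem.Str.lower w) ["a", "e", "i", "o", "u"] "_") [] (· ++ [w])) PySem.Dict.empty).contains (replaceChars (PySem.Str.lower q) ["a", "e", "i", "o", "u"] "_") then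
       ((wordlist.foldl (fun d w => d.modify (replaceChars (PySem.Str.lower w) ["a", "e", "i", "o", "u"] "_") [] (· ++ [w])) PySem.Dict.empty).getD (replaceChars (PySem.Str.lower q) ["a", "e", "i", "o", "u"] "_") []).headD ""
     else "") = answerB wordlist q := by
  simp only [maskA_eq_maskB, contains_foldl_insert_self, contains_foldl_modify,
    getD_foldl_modify_key, PySem.Dict.contains_empty, Bool.false_or, answerB]
  by_cases h1 : wordlist.contains q
  · simp only [h1, if_true]
  · simp only [Bool.not_eq_true] at h1
    simp only [h1, Bool.false_eq_true, if_false]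
    cases hf : wordlist.find? (fun w => PySem.Str.lower w == PySem.Str.lower q) with
    | some w =>
      have hmem : w ∈ wordlist := List.mem_of_find?_eq_some hf
      have heq : PySem.Str.lower w = PySem.Str.lower q := by
        have := List.find?_some hf; simpa using this
      have hc2 : ((wordlist.map PySem.Str.lower).contains (PySem.Str.lower q)) = true := by
        rw [List.contains_iff_exists_mem_beq]
        exact ⟨PySem.Str.lower w, List.mem_map_of_mem hmem, by simp [heq]⟩
      rw [hc2, if_pos rfl]
      have hh : (wordlist.filter (fun w => PySem.Str.lower w == PySem.Str.lower q)).head? = some w := by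
        rw [List.head?_filter, hf]
      rw [List.headD_eq_head?_getD, hh]
      rfl
    | none =>
      have hnone := List.find?_eq_none.mp hf
      have hc2 : ((wordlist.map PySem.Str.lower).contains (PySem.Str.lower q)) = false := by
        rw [Bool.eq_false_iff]
        intro hcon
        rw [List.contains_iff_exists_mem_beq] at hcon
        obtain ⟨a, ha, hb⟩ := hcon
        obtain ⟨w, hw, rfl⟩ := List.mem_map.mp ha
        have he := (beq_iff_eq).mp hb
        exact hnone w hw (by simp [← he])
      rw [hc2, if_neg Bool.false_ne_true]
      cases hg : wordlist.find? (fun w => maskB w == maskB q) with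
      | some w =>
        have hmem : w ∈ wordlist := List.mem_of_find?_eq_some hg
        have heq : maskB w = maskB q := by
          have := List.find?_some hg; simpa using this
        have hc3 : ((wordlist.map maskB).contains (maskB q)) = true := by
          rw [List.contains_iff_exists_mem_beq]
          exact ⟨maskB w, List.mem_map_of_mem hmem, by simp [heq]⟩
        rw [hc3, if_pos rfl]
        have hh : (wordlist.filter (fun w => maskB w == maskB q)).head? = some w := by
          rw [List.head?_filter, hg]
        rw [List.headD_eq_head?_getD, hh]
        rfl
      | none =>
        have hnone3 := List.find?_eq_none.mp hg
        have hc3 : ((wordlist.map maskB).contains (maskB q)) = false := by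
          rw [Bool.eq_false_iff]
          intro hcon
          rw [List.contains_iff_exists_mem_beq] at hcon
          obtain ⟨a, ha, hb⟩ := hcon
          obtain ⟨w, hw, rfl⟩ := List.mem_map.mp ha
          have he := (beq_iff_eq).mp hb
          exact hnone3 w hw (by simp [← he])
        rw [hc3, if_neg Bool.false_ne_true]

theorem foldl_append_map (g : String → String) (qs : List String) :
    ∀ acc : List String, qs.foldl (fun res q => res ++ [g q]) acc = acc ++ qs.map g := by
  induction qs with
  | nil => simp
  | cons x t ih => intro acc; simp [ih]

theorem dicts_eq (wordlist : List String) :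
    wordlist.foldl
      (fun (st : PySem.Dict String (List String) × PySem.Dict String (List String) × PySem.Dict String (List String)) word =>
        (st.1.insert word [word],
         st.2.1.modify (PySem.Str.lower word) [] (· ++ [word]),
         st.2.2.modify (replaceChars (PySem.Str.lower word) ["a", "e", "i", "o", "u"] "_") [] (· ++ [word])))
      (PySem.Dict.empty, PySem.Dict.empty, PySem.Dict.empty)
    = (wordlist.foldl (fun d w => d.insert w [w]) PySem.Dict.empty,
       wordlist.foldl (fun d w => d.modify (PySem.Str.lower w) [] (· ++ [w])) PySem.Dict.empty,
       wordlist.foldl (fun d w => d.modify (replaceChars (PySem.Str.lower w) ["a", "e", "i", "o", "u"] "_") [] (· ++ [w])) PySem.Dict.empty) :=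
  foldl_triple (fun d w => d.insert w [w])
    (fun d w => d.modify (PySem.Str.lower w) [] (· ++ [w]))
    (fun d w => d.modify (replaceChars (PySem.Str.lower w) ["a", "e", "i", "o", "u"] "_") [] (· ++ [w]))
    wordlist PySem.Dict.empty PySem.Dict.empty PySem.Dict.empty

-- ===== VERDICT (by name: the statement is the Claim_ definition above) =====
theorem spellchecker_spec : Claim_equal_spellchecker := by
  intro wordlist queries _
  unfold Spec_spellchecker spellchecker spellchecker_alt
  simp only [dicts_eq]
  have hbody : (fun (res : List String) query =>
      if (wordlist.foldl (fun d w => d.insert w [w]) PySem.Dict.empty).contains query then res ++ [query]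
      else if (wordlist.foldl (fun d w => d.modify (PySem.Str.lower w) [] (· ++ [w])) PySem.Dict.empty).contains (PySem.Str.lower query) then
        res ++ [((wordlist.foldl (fun d w => d.modify (PySem.Str.lower w) [] (· ++ [w])) PySem.Dict.empty).getD (PySem.Str.lower query) []).headD ""]
      else if (wordlist.foldl (fun d w => d.modify (replaceChars (PySem.Str.lower w) ["a", "e", "i", "o", "u"] "_") [] (· ++ [w])) PySem.Dict.empty).contains (replaceChars (PySem.Str.lower query) ["a", "e", "i", "o", "u"] "_") then
        res ++ [((wordlist.foldl (fun d w => d.modify (replaceChars (PySem.Str.lower w) ["a", "e", "i", "o", "u"] "_") [] (· ++ [w])) PySem.Dict.empty).getD (replaceChars (PySem.Str.lower query) ["a", "e", "i", "o", "u"] "_") []).headD ""]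
      else res ++ [""])
      = fun (res : List String) query => res ++ [answerB wordlist query] := by
    funext res query
    rw [← answer_eq wordlist query]
    split_ifs <;> rfl
  rw [hbody, foldl_append_map]
  simp
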